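-- pv_equiv track=rewrite | github.com/dannydeward/Programa-contable | programa contable.py | balance_general_dia
-- ===== SOURCE A (Python) =====
-- def balance_general_dia(registros, fecha):
--     if fecha in registros:
--         transacciones = registros[fecha]
--         ingresos = sum(cantidad for cantidad, _, tipo in transacciones if tipo == 'ingreso')
--         gastos = sum(cantidad for cantidad, _, tipo in transacciones if tipo == 'gasto')
--         balance_dia = ingresos - gastos
--         return balance_dia
--     else:
--         return 0
-- ===== SOURCE B (Python) =====
-- def balance_general_dia(registros, fecha):
--     if fecha in registros:
--         balance = 0
--         for cantidad, _, tipo in registros[fecha]: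
--             if tipo == 'ingreso':
--                 balance += cantidad
--             elif tipo == 'gasto':
--                 balance -= cantidad
--         return balance
--     else:
--         return 0
-- ===== Notes on version B (the rewrite author's own statement) =====
-- stated objective: simpler
-- what changed: Replaces the two filtered sum comprehensions (two passes over the day's transactions) with a single accumulator loop that adds 'ingreso' amounts and subtracts 'gasto' amounts in one pass.
import Mathlib
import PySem

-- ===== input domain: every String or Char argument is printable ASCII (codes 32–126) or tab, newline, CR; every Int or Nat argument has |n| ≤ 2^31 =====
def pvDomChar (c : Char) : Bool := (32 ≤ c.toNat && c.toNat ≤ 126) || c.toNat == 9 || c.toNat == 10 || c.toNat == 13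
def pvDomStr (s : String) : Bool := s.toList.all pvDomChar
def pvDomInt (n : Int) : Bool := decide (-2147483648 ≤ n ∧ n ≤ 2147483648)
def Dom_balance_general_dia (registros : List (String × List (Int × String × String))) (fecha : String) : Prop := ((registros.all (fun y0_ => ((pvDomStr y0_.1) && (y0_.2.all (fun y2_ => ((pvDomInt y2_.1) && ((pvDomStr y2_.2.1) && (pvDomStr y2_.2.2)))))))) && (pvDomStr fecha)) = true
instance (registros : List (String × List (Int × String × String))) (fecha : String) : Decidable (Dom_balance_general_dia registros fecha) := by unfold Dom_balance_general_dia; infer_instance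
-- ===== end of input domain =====

-- B replaces A's two filtered sum passes with one accumulator fold over the day's transactions (objective: simpler).


-- ===== PORT A =====
def balance_general_dia (registros : List (String × List (Int × String × String))) (fecha : String) : Int :=
  match (PySem.Dict.mk registros).get? fecha with
  | some transacciones =>
      let ingresos := ((transacciones.filter (fun t => t.2.2 == "ingreso")).map (fun t => t.1)).sum
      let gastos := ((transacciones.filter (fun t => t.2.2 == "gasto")).map (fun t => t.1)).sum
      let balance_dia := ingresos - gastos
      balance_dia
  | none => 0

-- ===== PORT B =====
def balance_general_dia_alt (registros : List (String × List (Int × String × String))) (fecha : String) : Int :=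
  match (PySem.Dict.mk registros).get? fecha with
  | some ts =>
      ts.foldl (fun balance t =>
        if t.2.2 == "ingreso" then balance + t.1
        else if t.2.2 == "gasto" then balance - t.1
        else balance) 0
  | none => 0

-- ===== PRECONDITION & SPEC =====
def Spec_balance_general_dia (registros : List (String × List (Int × String × String))) (fecha : String) (out : Int) : Prop := out = balance_general_dia_alt registros fecha
instance (registros : List (String × List (Int × String × String))) (fecha : String) (out : Int) : Decidable (Spec_balance_general_dia registros fecha out) := by unfold Spec_balance_general_dia; infer_instance

-- ===== CLAIM (what is proved, stated in full; the proofs are below) =====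
def Claim_equal_balance_general_dia : Prop := ∀ (registros : List (String × List (Int × String × String))) (fecha : String), Dom_balance_general_dia registros fecha → Spec_balance_general_dia registros fecha (balance_general_dia registros fecha)

-- ===== LEMMAS AND PROOFS =====

-- One-pass fold equals (sum of ingresos) − (sum of gastos), for any starting accumulator.
theorem pv_fold_eq_sums (ts : List (Int × String × String)) (b : Int) :
    ts.foldl (fun balance t =>
        if t.2.2 == "ingreso" then balance + t.1
        else if t.2.2 == "gasto" then balance - t.1
        else balance) b
      = b + ((ts.filter (fun t => t.2.2 == "ingreso")).map (fun t => t.1)).sum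
          - ((ts.filter (fun t => t.2.2 == "gasto")).map (fun t => t.1)).sum := by
  induction ts generalizing b with
  | nil => simp
  | cons t rest ih =>
      simp only [List.foldl, List.filter_cons]
      rw [ih]
      by_cases h1 : t.2.2 == "ingreso"
      · have e := eq_of_beq h1
        simp [e]; ring
      · by_cases h2 : t.2.2 == "gasto"
        · have e := eq_of_beq h2
          simp [e]; ring
        · simp [h1, h2]

-- ===== VERDICT (by name: the statement is the Claim_ definition above) =====
theorem balance_general_dia_spec : Claim_equal_balance_general_dia := by
  intro registros fecha _
  unfold Spec_balance_general_dia balance_general_dia balance_general_dia_alt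
  cases h : (PySem.Dict.mk registros).get? fecha with
  | none => rfl
  | some ts =>
      simp only []
      rw [pv_fold_eq_sums ts 0]
      ring
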